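-- pv_equiv track=rewrite | github.com/jeff91734/MyStanCodeProjects | S101_projects/boggle_game/boggle.py | has_prefix
-- ===== SOURCE A (Python) =====
-- def has_prefix(sub_s, dictionary):
-- 	"""
-- 	:param sub_s: (str) A substring that is constructed by neighboring letters on a 4x4 square grid
-- 	:return: (bool) If there is any words with prefix stored in sub_s
-- 	"""
-- 	abcdefg = ['a', 'b', 'c', 'd', 'e', 'f', 'g']
-- 	hijklmnop = ['h', 'i', 'j', 'k', 'l', 'm', 'n', 'o', 'p']
-- 	qrstuv = ['q', 'r', 's', 't', 'u', 'v']
-- 	wxyz = ['w', 'x', 'y', 'z']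
-- 	if len(sub_s) < 1:  # no string to check, return true to move on
-- 		return True
-- 	else:
-- 		sub_s.lower()
-- 		if sub_s[0] in abcdefg:
-- 			x = 0
-- 			y = 50000
-- 		elif sub_s[0] in hijklmnop:
-- 			x = 49000
-- 			y = 89000
-- 		elif sub_s[0] in qrstuv:
-- 			x = 85000
-- 			y = 123000
-- 		elif sub_s[0] in wxyz:
-- 			x = 123000
-- 			y = len(dictionary)
--
-- 		for word in dictionary[x:y]:
-- 			if word.startswith(sub_s) is True:
-- 				return True
-- ===== SOURCE B (Python) =====
-- def has_prefix(sub_s, dictionary):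
--     """
--     :param sub_s: (str) A substring that is constructed by neighboring letters on a 4x4 square grid
--     :return: (bool) If there is any words with prefix stored in sub_s
--     """
--     if len(sub_s) < 1:  # no string to check, return true to move on
--         return True
--     c = sub_s[0]
--     if 'a' <= c <= 'g':
--         lo, hi = 0, 50000
--     elif 'h' <= c <= 'p':
--         lo, hi = 49000, 89000
--     elif 'q' <= c <= 'v':
--         lo, hi = 85000, 123000
--     else:  # 'w'..'z'
--         lo, hi = 123000, len(dictionary)
--     words = sorted(dictionary[lo:hi])
--     # binary search: least index i with words[i] >= sub_s
--     i, j = 0, len(words)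
--     while i < j:
--         mid = (i + j) // 2
--         if words[mid] < sub_s:
--             i = mid + 1
--         else:
--             j = mid
--     if i < len(words) and words[i].startswith(sub_s):
--         return True
-- ===== Notes on version B (the rewrite author's own statement) =====
-- stated objective: alternative
-- what changed: The linear startswith-scan over the bucket slice is replaced by sorting the slice and binary-searching (bisect_left by hand) for the insertion point of sub_s, then checking startswith on the single word found there; correctness rests on prefix-matches forming a contiguous block starting at the insertion point in sorted order.
import Mathlib
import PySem

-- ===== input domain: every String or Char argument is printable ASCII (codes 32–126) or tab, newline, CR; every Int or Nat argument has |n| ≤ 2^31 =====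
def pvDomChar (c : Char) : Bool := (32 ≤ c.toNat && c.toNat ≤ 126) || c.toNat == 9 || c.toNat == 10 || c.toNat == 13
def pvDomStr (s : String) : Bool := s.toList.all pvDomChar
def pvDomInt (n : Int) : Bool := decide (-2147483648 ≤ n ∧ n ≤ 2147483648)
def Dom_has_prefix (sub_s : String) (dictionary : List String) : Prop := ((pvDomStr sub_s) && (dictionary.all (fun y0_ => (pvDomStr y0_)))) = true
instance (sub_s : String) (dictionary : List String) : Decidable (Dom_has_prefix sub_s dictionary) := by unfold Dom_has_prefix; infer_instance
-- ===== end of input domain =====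

-- B replaces A's linear startswith-scan of the bucket slice by sorting the slice and
-- binary-searching for sub_s's insertion point (objective: alternative algorithm, not faster).

-- ===== PORT A =====
-- the 'for word in dictionary[x:y]: if word.startswith(sub_s) is True: return True' loop (falls off the end = None)
def hpScan (sub_s : String) : List String → Option Bool
  | [] => none
  | w :: ws => if PySem.Str.startswith w sub_s then some true else hpScan sub_s ws

def has_prefix (sub_s : String) (dictionary : List String) : Option Bool :=
  if PySem.Str.len sub_s < 1 then some true
  else
    let _ := PySem.Str.lower sub_s  -- A computes sub_s.lower() and discards it
    match PySem.Str.pyGet? sub_s 0 with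
    | none => none
    | some c =>
      if (['a','b','c','d','e','f','g'] : List Char).contains c then
        hpScan sub_s (PySem.List.slice dictionary (some 0) (some 50000))
      else if (['h','i','j','k','l','m','n','o','p'] : List Char).contains c then
        hpScan sub_s (PySem.List.slice dictionary (some 49000) (some 89000))
      else if (['q','r','s','t','u','v'] : List Char).contains c then
        hpScan sub_s (PySem.List.slice dictionary (some 85000) (some 123000))
      else if (['w','x','y','z'] : List Char).contains c then
        hpScan sub_s (PySem.List.slice dictionary (some 123000) (some (PySem.List.len dictionary)))
      else none  -- x, y unbound: Python raises UnboundLocalError (excluded by Pre_)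

-- ===== PORT B =====
-- the hand-written bisect_left loop of Source B; strings are compared as their char lists
-- (Lean's List Char order = Python's str '<'); words[mid] is always in range, .getD models it
def hpBsearch (words : List String) (t : List Char) (i j : Nat) : Nat :=
  if h : i < j then
    let mid := (i + j) / 2
    if (words.getD mid "").toList < t then hpBsearch words t (mid + 1) j
    else hpBsearch words t i mid
  else i
termination_by j - i
decreasing_by all_goals omega

def has_prefix_alt (sub_s : String) (dictionary : List String) : Option Bool :=
  if PySem.Str.len sub_s < 1 then some true
  else
    match PySem.Str.pyGet? sub_s 0 with
    | none => none  -- unreachable (sub_s nonempty); totality guard only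
    | some c =>
      let b : Int × Int :=
        if 'a' ≤ c ∧ c ≤ 'g' then (0, 50000)
        else if 'h' ≤ c ∧ c ≤ 'p' then (49000, 89000)
        else if 'q' ≤ c ∧ c ≤ 'v' then (85000, 123000)
        else (123000, PySem.List.len dictionary)
      let words := PySem.List.sorted (PySem.List.slice dictionary (some b.1) (some b.2)) (fun w => w.toList)
      let i := hpBsearch words sub_s.toList 0 words.length
      if hlt : i < words.length then
        if PySem.Str.startswith words[i] sub_s then some true else none
      else none

-- ===== PRECONDITION & SPEC =====
-- Pre_ excludes exactly the inputs where A raises UnboundLocalError: a nonempty sub_s whose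
-- first character is not a lowercase ASCII letter (x, y are then never assigned).
def Pre_has_prefix (sub_s : String) (dictionary : List String) : Prop :=
  (sub_s.toList.take 1).all (fun c => decide ('a' ≤ c) && decide (c ≤ 'z')) = true
instance (sub_s : String) (dictionary : List String) : Decidable (Pre_has_prefix sub_s dictionary) := by unfold Pre_has_prefix; infer_instance

def pvWitness_has_prefix : String × List String := ("ab", ["abc", "zebra"])

def Spec_has_prefix (sub_s : String) (dictionary : List String) (out : Option Bool) : Prop := out = has_prefix_alt sub_s dictionary
instance (sub_s : String) (dictionary : List String) (out : Option Bool) : Decidable (Spec_has_prefix sub_s dictionary out) := by unfold Spec_has_prefix; infer_instance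

-- ===== CLAIM (what is proved, stated in full; the proofs are below) =====
def Claim_equal_has_prefix : Prop := ∀ (sub_s : String) (dictionary : List String), Dom_has_prefix sub_s dictionary → Pre_has_prefix sub_s dictionary → Spec_has_prefix sub_s dictionary (has_prefix sub_s dictionary)

-- ===== LEMMAS AND PROOFS =====

-- A's loop returns some true iff some word of the slice has the prefix, else none
lemma hpScan_eq_any (t : String) (l : List String) :
    hpScan t l = (if l.any (fun w => PySem.Str.startswith w t) then some true else none) := by
  induction l with
  | nil => simp [hpScan]
  | cons w ws ih =>
    by_cases h : PySem.Str.startswith w t <;>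
      simp only [hpScan, h, ih, List.any_cons, Bool.true_or, Bool.false_or, if_true,
        Bool.false_eq_true, if_false]

-- a prefix is ≤ in the lexicographic order (so a word with prefix t is never < t)
lemma prefix_not_lt (t w : List Char) (h : t <+: w) : ¬ w < t := by
  induction t generalizing w with
  | nil => exact List.not_lt_nil w
  | cons a t' ih =>
    obtain ⟨w', rfl⟩ := h
    rw [List.cons_append, List.cons_lt_cons_iff]
    rintro (hlt | ⟨-, hlex⟩)
    · exact lt_irrefl a hlt
    · exact ih (t' ++ w') (List.prefix_append t' w') hlex

-- words with prefix t form an interval: t ≤ v ≤ w and t a prefix of w force t a prefix of v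
lemma prefix_interval (t v w : List Char) (h1 : ¬ v < t) (h2 : ¬ w < v) (h3 : t <+: w) :
    t <+: v := by
  induction t generalizing v w with
  | nil => exact List.nil_prefix
  | cons a t' ih =>
    obtain ⟨w', rfl⟩ := h3
    match v with
    | [] => exact absurd (List.nil_lt_cons a t') h1
    | b :: v' =>
      rw [List.cons_append] at h2
      rw [List.cons_lt_cons_iff] at h1 h2
      push Not at h1 h2
      have hab : b = a := le_antisymm h2.1 h1.1
      subst hab
      exact List.cons_prefix_cons.2
        ⟨rfl, ih v' (t' ++ w') (not_lt.2 (h1.2 rfl)) (not_lt.2 (h2.2 rfl))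
          (List.prefix_append t' w')⟩

-- invariant of the bisect_left loop: it returns the least index whose word is ≥ t
lemma hpBsearch_inv (words : List String) (t : List Char)
    (hsort : List.Pairwise (fun a b => a.toList ≤ b.toList) words) :
    ∀ (n i j : Nat), j - i ≤ n → i ≤ j → j ≤ words.length →
    (∀ k, k < i → (hk : k < words.length) → words[k].toList < t) →
    (∀ k, j ≤ k → (hk : k < words.length) → ¬ words[k].toList < t) →
    (∀ k, k < hpBsearch words t i j → (hk : k < words.length) → words[k].toList < t) ∧
    (∀ k, hpBsearch words t i j ≤ k → (hk : k < words.length) → ¬ words[k].toList < t) ∧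
    hpBsearch words t i j ≤ words.length := by
  intro n
  induction n with
  | zero =>
    intro i j hn hij hjl hlo hhi
    have : i = j := by omega
    subst this
    rw [hpBsearch, dif_neg (lt_irrefl i)]
    exact ⟨hlo, hhi, hjl⟩
  | succ n ih =>
    intro i j hn hij hjl hlo hhi
    rw [hpBsearch]
    by_cases h : i < j
    · rw [dif_pos h]
      have hmid₁ : i ≤ (i + j) / 2 := by omega
      have hmid₂ : (i + j) / 2 < j := by omega
      have hmlen : (i + j) / 2 < words.length := by omega
      have hgetd : words.getD ((i + j) / 2) "" = words[(i + j) / 2] := List.getD_eq_getElem words "" hmlen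
      by_cases hc : (words.getD ((i + j) / 2) "").toList < t
      · rw [if_pos hc]
        refine ih ((i + j) / 2 + 1) j (by omega) (by omega) hjl ?_ hhi
        intro k hk hklen
        rcases Nat.lt_or_ge k ((i + j) / 2) with hk' | hk'
        · calc words[k].toList ≤ words[(i + j) / 2].toList :=
                List.pairwise_iff_getElem.1 hsort k _ hklen hmlen hk'
            _ < t := by rwa [hgetd] at hc
        · have : k = (i + j) / 2 := by omega
          subst this
          rwa [hgetd] at hc
      · rw [if_neg hc]
        refine ih i ((i + j) / 2) (by omega) (by omega) (by omega) hlo ?_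
        intro k hk hklen hkt
        rcases Nat.lt_or_ge ((i + j) / 2) k with hk' | hk'
        · have : words[(i + j) / 2].toList ≤ words[k].toList :=
            List.pairwise_iff_getElem.1 hsort _ k hmlen hklen hk'
          exact hc (by rw [hgetd]; exact lt_of_le_of_lt this hkt)
        · have : k = (i + j) / 2 := by omega
          subst this
          exact hc (by rwa [hgetd])
    · rw [dif_neg h]
      have : i = j := by omega
      subst this
      exact ⟨hlo, hhi, hjl⟩

-- the sort in the port and the library's order lemmas elaborate with definitionally equal
-- but syntactically different LT/DecidableLT instances on List Char; bridge them once
lemma sorted_inst (l : List String) :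
    PySem.List.sorted l (fun w => w.toList) =
      @PySem.List.sorted String (List Char) List.instLinearOrder.toLT LinearOrder.toDecidableLT l (fun w => w.toList) false := by
  congr 1

-- core: A's linear scan of a slice = B's sort + bisect of the same slice
lemma scan_eq_sorted_bisect (t : String) (l : List String) :
    hpScan t l =
      (if hlt : hpBsearch (PySem.List.sorted l (fun w => w.toList)) t.toList 0
                  (PySem.List.sorted l (fun w => w.toList)).length <
                (PySem.List.sorted l (fun w => w.toList)).length then
        (if PySem.Str.startswith
              (PySem.List.sorted l (fun w => w.toList))[hpBsearch (PySem.List.sorted l (fun w => w.toList)) t.toList 0 (PySem.List.sorted l (fun w => w.toList)).length]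
              t then some true else none)
      else none) := by
  set words := PySem.List.sorted l (fun w => w.toList) with hwords
  have hperm : words.Perm l := by
    rw [hwords]; exact PySem.List.sorted_perm l (fun w => w.toList) false
  have hsort : List.Pairwise (fun a b : String => a.toList ≤ b.toList) words := by
    rw [hwords, sorted_inst]; exact PySem.List.sorted_pairwise l (fun w => w.toList)
  obtain ⟨hlow, hhigh, hle⟩ :=
    hpBsearch_inv words t.toList hsort words.length 0 words.length (by omega) (by omega)
      le_rfl (by omega) (by omega)
  set r := hpBsearch words t.toList 0 words.length with hr
  rw [hpScan_eq_any, ← hperm.any_eq]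
  have hsw : ∀ w : String, PySem.Str.startswith w t = true ↔ t.toList <+: w.toList := by
    intro w
    rw [PySem.Str.startswith_eq]
    exact PySem.Chars.startswith_iff _ _
  by_cases hlt : r < words.length
  · rw [dif_pos hlt]
    by_cases hp : PySem.Str.startswith words[r] t
    · rw [if_pos hp, if_pos]
      exact List.any_eq_true.2 ⟨words[r], words.getElem_mem hlt, hp⟩
    · rw [if_neg hp, if_neg]
      simp only [List.any_eq_true, not_exists, not_and]
      rintro w hw
      obtain ⟨k, hk, rfl⟩ := List.mem_iff_getElem.1 hw
      intro hws
      have hpre : t.toList <+: words[k].toList := (hsw _).1 hws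
      rcases Nat.lt_or_ge k r with hk' | hk'
      · exact prefix_not_lt _ _ hpre (hlow k hk' hk)
      · have hrk : ¬ words[k].toList < words[r].toList := by
          rcases Nat.eq_or_lt_of_le hk' with rfl | hk''
          · exact lt_irrefl _
          · exact not_lt.2 (List.pairwise_iff_getElem.1 hsort r k hlt hk hk'')
        exact hp ((hsw _).2 (prefix_interval t.toList words[r].toList words[k].toList
          (hhigh r le_rfl hlt) hrk hpre))
  · rw [dif_neg hlt]
    rw [if_neg]
    simp only [List.any_eq_true, not_exists, not_and]
    rintro w hw
    obtain ⟨k, hk, rfl⟩ := List.mem_iff_getElem.1 hw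
    intro hws
    exact prefix_not_lt _ _ ((hsw _).1 hws) (hlow k (by omega) hk)

-- bucket membership in A's literal letter lists = B's range tests, for a lowercase first letter
lemma contains_ag (c : Char) :
    ((['a','b','c','d','e','f','g'] : List Char).contains c) = decide ('a' ≤ c ∧ c ≤ 'g') := by
  simp only [List.contains_eq_mem, List.mem_cons, List.not_mem_nil, or_false, decide_eq_decide]
  constructor
  · rintro (rfl | rfl | rfl | rfl | rfl | rfl | rfl) <;> exact ⟨by decide, by decide⟩
  · rintro ⟨h1, h2⟩
    have h1' : 97 ≤ c.toNat := h1
    have h2' : c.toNat ≤ 103 := h2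
    have hc := (Char.ofNat_toNat c).symm
    interval_cases h : c.toNat <;> rw [hc] <;> decide
lemma contains_hp (c : Char) :
    ((['h','i','j','k','l','m','n','o','p'] : List Char).contains c) = decide ('h' ≤ c ∧ c ≤ 'p') := by
  simp only [List.contains_eq_mem, List.mem_cons, List.not_mem_nil, or_false, decide_eq_decide]
  constructor
  · rintro (rfl | rfl | rfl | rfl | rfl | rfl | rfl | rfl | rfl) <;> exact ⟨by decide, by decide⟩
  · rintro ⟨h1, h2⟩
    have h1' : 104 ≤ c.toNat := h1
    have h2' : c.toNat ≤ 112 := h2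
    have hc := (Char.ofNat_toNat c).symm
    interval_cases h : c.toNat <;> rw [hc] <;> decide
lemma contains_qv (c : Char) :
    ((['q','r','s','t','u','v'] : List Char).contains c) = decide ('q' ≤ c ∧ c ≤ 'v') := by
  simp only [List.contains_eq_mem, List.mem_cons, List.not_mem_nil, or_false, decide_eq_decide]
  constructor
  · rintro (rfl | rfl | rfl | rfl | rfl | rfl) <;> exact ⟨by decide, by decide⟩
  · rintro ⟨h1, h2⟩
    have h1' : 113 ≤ c.toNat := h1
    have h2' : c.toNat ≤ 118 := h2
    have hc := (Char.ofNat_toNat c).symm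
    interval_cases h : c.toNat <;> rw [hc] <;> decide
lemma contains_wz (c : Char) :
    ((['w','x','y','z'] : List Char).contains c) = decide ('w' ≤ c ∧ c ≤ 'z') := by
  simp only [List.contains_eq_mem, List.mem_cons, List.not_mem_nil, or_false, decide_eq_decide]
  constructor
  · rintro (rfl | rfl | rfl | rfl) <;> exact ⟨by decide, by decide⟩
  · rintro ⟨h1, h2⟩
    have h1' : 119 ≤ c.toNat := h1
    have h2' : c.toNat ≤ 122 := h2
    have hc := (Char.ofNat_toNat c).symm
    interval_cases h : c.toNat <;> rw [hc] <;> decide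

-- ===== VERDICT (by name: the statement is the Claim_ definition above) =====
theorem has_prefix_spec : Claim_equal_has_prefix := by
  intro sub_s dictionary _ hpre
  unfold Spec_has_prefix has_prefix has_prefix_alt
  by_cases hs0 : sub_s.toList = []
  · rw [if_pos, if_pos] <;> simp [PySem.Str.len_eq, hs0]
  · obtain ⟨c, cs, hs⟩ : ∃ c cs, sub_s.toList = c :: cs := by
      cases h' : sub_s.toList with
      | nil => exact absurd h' hs0
      | cons c cs => exact ⟨c, cs, rfl⟩
    have hlen : ¬ PySem.Str.len sub_s < 1 := by
      simp [PySem.Str.len_eq, hs]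
    rw [if_neg hlen, if_neg hlen]
    have hget : PySem.Str.pyGet? sub_s 0 = some c := by
      simp [PySem.Str.pyGet?_eq, PySem.Chars.pyGet?_eq_listPyGet?, hs]
    rw [hget]
    have hc : 'a' ≤ c ∧ c ≤ 'z' := by
      unfold Pre_has_prefix at hpre
      rw [hs] at hpre
      simpa using hpre
    simp only [contains_ag, contains_hp, contains_qv, contains_wz]
    by_cases h1 : 'a' ≤ c ∧ c ≤ 'g'
    · rw [if_pos (by simpa using h1), if_pos h1]
      exact scan_eq_sorted_bisect sub_s _
    · rw [if_neg (by simpa using h1), if_neg h1]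
      by_cases h2 : 'h' ≤ c ∧ c ≤ 'p'
      · rw [if_pos (by simpa using h2), if_pos h2]
        exact scan_eq_sorted_bisect sub_s _
      · rw [if_neg (by simpa using h2), if_neg h2]
        by_cases h3 : 'q' ≤ c ∧ c ≤ 'v'
        · rw [if_pos (by simpa using h3), if_pos h3]
          exact scan_eq_sorted_bisect sub_s _
        · rw [if_neg (by simpa using h3), if_neg h3]
          have h4 : 'w' ≤ c ∧ c ≤ 'z' := by
            have g1 : 97 ≤ c.toNat := hc.1
            have g2 : c.toNat ≤ 122 := hc.2
            have g3 : ¬ (97 ≤ c.toNat ∧ c.toNat ≤ 103) := fun h => h1 ⟨h.1, h.2⟩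
            have g4 : ¬ (104 ≤ c.toNat ∧ c.toNat ≤ 112) := fun h => h2 ⟨h.1, h.2⟩
            have g5 : ¬ (113 ≤ c.toNat ∧ c.toNat ≤ 118) := fun h => h3 ⟨h.1, h.2⟩
            exact ⟨(by omega : 119 ≤ c.toNat), (by omega : c.toNat ≤ 122)⟩
          rw [if_pos (by simpa using h4)]
          exact scan_eq_sorted_bisect sub_s _
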